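-- pv_equiv track=rewrite | github.com/Maxbaut/SAE-601_Developpement_outil_decisionnel2 | SAE-601_Pokemon/data_transformation/main.py | build_evolution_hierarchy
-- ===== SOURCE A (Python) =====
-- def build_evolution_hierarchy(cards_data):
--     """Construire une hiérarchie d'évolution à partir des données des cartes."""
--     evolution_hierarchy = {}
--     for card in cards_data:
--         pokemon_name = card["name"].split(" (")[0]
--         evolves_from = card.get("evolves_from", "N/A")
--         if evolves_from != "N/A":
--             if evolves_from not in evolution_hierarchy:
--                 evolution_hierarchy[evolves_from] = []
--             evolution_hierarchy[evolves_from].append(pokemon_name)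
--     return evolution_hierarchy
-- ===== SOURCE B (Python) =====
-- def build_evolution_hierarchy(cards_data):
--     """Construire une hiérarchie d'évolution à partir des données des cartes."""
--     pairs = [(card.get("evolves_from", "N/A"), card["name"].split(" (")[0])
--              for card in cards_data]
--     parents = []
--     for parent, _ in pairs:
--         if parent != "N/A" and parent not in parents:
--             parents.append(parent)
--     return {p: [name for parent, name in pairs if parent == p] for p in parents}
-- ===== Notes on version B (the rewrite author's own statement) =====
-- stated objective: alternative
-- what changed: Replaces the single-pass dict accumulation (insert-empty-then-append per card) by a two-phase grouping: extract all (parent, name) pairs once, collect the distinct non-N/A parents in first-occurrence order, then build each group with a per-parent filter comprehension.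
import Mathlib
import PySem

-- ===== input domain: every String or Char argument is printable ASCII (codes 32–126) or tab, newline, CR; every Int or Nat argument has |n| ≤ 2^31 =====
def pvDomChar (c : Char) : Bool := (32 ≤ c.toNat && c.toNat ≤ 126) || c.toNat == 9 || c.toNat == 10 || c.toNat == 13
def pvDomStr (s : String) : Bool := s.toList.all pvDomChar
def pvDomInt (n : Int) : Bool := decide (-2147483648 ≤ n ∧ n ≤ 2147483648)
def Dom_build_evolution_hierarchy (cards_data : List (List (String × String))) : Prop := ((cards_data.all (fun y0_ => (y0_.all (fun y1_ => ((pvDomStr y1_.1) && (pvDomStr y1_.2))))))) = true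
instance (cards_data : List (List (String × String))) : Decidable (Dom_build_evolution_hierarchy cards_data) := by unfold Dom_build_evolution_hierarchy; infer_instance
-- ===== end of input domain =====

-- B replaces A's single-pass dict accumulation by a two-phase grouping (distinct parents first, then a per-parent filter); alternative decomposition, not faster.


-- ===== PORT A =====
-- card["name"].split(" (")[0]  (split? with the non-empty separator " (" is never none, and a Python
-- split result is never empty, so the getD/headD defaults are unreachable; Pre_ guarantees "name" is present)
def pvName (card : List (String × String)) : String :=
  ((PySem.Str.split? (((PySem.Dict.mk card).get? "name").getD "") " (").getD []).headD ""

def build_evolution_hierarchy (cards_data : List (List (String × String))) : List (String × List String) :=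
  (cards_data.foldl (fun h card =>
      let pokemon_name := pvName card
      let evolves_from := (PySem.Dict.mk card).getD "evolves_from" "N/A"
      if evolves_from ≠ "N/A" then
        let h' := if h.contains evolves_from then h else h.insert evolves_from []
        h'.modify evolves_from [] (· ++ [pokemon_name])
      else h)
    PySem.Dict.empty).items

-- ===== PORT B =====
def build_evolution_hierarchy_alt (cards_data : List (List (String × String))) : List (String × List String) :=
  let pairs := cards_data.map (fun card =>
      ((PySem.Dict.mk card).getD "evolves_from" "N/A", pvName card))
  let parents := pairs.foldl (fun ps pq =>
      if pq.1 ≠ "N/A" ∧ pq.1 ∉ ps then ps ++ [pq.1] else ps) []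
  parents.map (fun p => (p, (pairs.filter (fun q => q.1 == p)).map (·.2)))

-- ===== PRECONDITION & SPEC =====
-- Pre_ excludes only cards without a "name" key, on which Python A raises KeyError (B raises there too).
def Pre_build_evolution_hierarchy (cards_data : List (List (String × String))) : Prop :=
  ∀ card ∈ cards_data, ((PySem.Dict.mk card).get? "name").isSome = true
instance (cards_data : List (List (String × String))) : Decidable (Pre_build_evolution_hierarchy cards_data) := by unfold Pre_build_evolution_hierarchy; infer_instance

def pvWitness_build_evolution_hierarchy : (List (List (String × String))) :=
  [[("name", "Raichu (holo)"), ("evolves_from", "Pikachu")], [("name", "Pikachu")]]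

def Spec_build_evolution_hierarchy (cards_data : List (List (String × String))) (out : List (String × List String)) : Prop := out = build_evolution_hierarchy_alt cards_data
instance (cards_data : List (List (String × String))) (out : List (String × List String)) : Decidable (Spec_build_evolution_hierarchy cards_data out) := by unfold Spec_build_evolution_hierarchy; infer_instance

-- ===== CLAIM (what is proved, stated in full; the proofs are below) =====
def Claim_equal_build_evolution_hierarchy : Prop := ∀ (cards_data : List (List (String × String))), Dom_build_evolution_hierarchy cards_data → Pre_build_evolution_hierarchy cards_data → Spec_build_evolution_hierarchy cards_data (build_evolution_hierarchy cards_data)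

-- ===== LEMMAS AND PROOFS =====

-- proof-only names for the two loop bodies (A's dict step on a (parent, name) pair; the plain modify-append step)
def pvStepA (h : PySem.Dict String (List String)) (pq : String × String) : PySem.Dict String (List String) :=
  if pq.1 ≠ "N/A" then
    (if h.contains pq.1 then h else h.insert pq.1 []).modify pq.1 [] (· ++ [pq.2])
  else h

def pvStepM (h : PySem.Dict String (List String)) (pq : String × String) : PySem.Dict String (List String) :=
  h.modify pq.1 [] (· ++ [pq.2])

-- A's per-pair step (insert-[] when absent, then append) is one modify-append; no-op on "N/A"
lemma stepA_eq (h : PySem.Dict String (List String)) (pq : String × String) (hx : pq.1 ≠ "N/A") :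
    pvStepA h pq = pvStepM h pq := by
  unfold pvStepA pvStepM
  rw [if_pos hx]
  by_cases hc : h.contains pq.1
  · rw [if_pos hc]
  · rw [if_neg hc]
    simp only [Bool.not_eq_true] at hc
    simp only [PySem.Dict.modify, PySem.Dict.getD_insert_self,
      PySem.Dict.insert_insert_self, PySem.Dict.getD_of_not_contains h [] hc]

-- A's whole loop over the (evolves_from, name) pairs is a modify-append fold over the non-"N/A" pairs.
lemma foldl_stepA_eq (L : List (String × String)) (d : PySem.Dict String (List String)) :
    L.foldl pvStepA d = (L.filter (fun pq => !(pq.1 == "N/A"))).foldl pvStepM d := by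
  induction L generalizing d with
  | nil => rfl
  | cons x t ih =>
    rw [List.foldl_cons, List.filter_cons]
    by_cases hx : x.1 = "N/A"
    · rw [show pvStepA d x = d from by simp [pvStepA, hx], if_neg (by simp [hx])]
      exact ih d
    · rw [stepA_eq d x hx, if_pos (by simp [hx]), List.foldl_cons]
      exact ih (pvStepM d x)

-- B's parents loop is the Set.add fold over the non-"N/A" pairs.
lemma parents_eq (L : List (String × String)) (ps : PySem.Set String) :
    L.foldl (fun ps pq => if pq.1 ≠ "N/A" ∧ pq.1 ∉ ps then ps ++ [pq.1] else ps) ps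
      = (L.filter (fun pq => !(pq.1 == "N/A"))).foldl (fun ps pq => PySem.Set.add ps pq.1) ps := by
  induction L generalizing ps with
  | nil => rfl
  | cons x t ih =>
    rw [List.foldl_cons, List.filter_cons]
    by_cases hx : x.1 = "N/A"
    · rw [if_neg (show ¬(x.1 ≠ "N/A" ∧ x.1 ∉ ps) from by simp [hx]), if_neg (by simp [hx])]
      exact ih ps
    · rw [if_pos (show (!(x.1 == "N/A")) = true from by simp [hx]), List.foldl_cons]
      by_cases hm : x.1 ∈ ps
      · rw [if_neg (show ¬(x.1 ≠ "N/A" ∧ x.1 ∉ ps) from by simp [hm]), PySem.Set.add_of_mem hm]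
        exact ih ps
      · rw [if_pos ⟨hx, hm⟩, PySem.Set.add_of_not_mem hm]
        exact ih (ps ++ [x.1])

-- ===== VERDICT (by name: the statement is the Claim_ definition above) =====
theorem build_evolution_hierarchy_spec : Claim_equal_build_evolution_hierarchy := by
  intro cards _ _
  unfold Spec_build_evolution_hierarchy build_evolution_hierarchy build_evolution_hierarchy_alt
  simp only []
  set pairs := cards.map (fun card =>
      ((PySem.Dict.mk card).getD "evolves_from" "N/A", pvName card)) with hpairs
  set M := pairs.filter (fun pq => !(pq.1 == "N/A")) with hM
  have hA : cards.foldl (fun h card =>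
      let pokemon_name := pvName card
      let evolves_from := (PySem.Dict.mk card).getD "evolves_from" "N/A"
      if evolves_from ≠ "N/A" then
        (if h.contains evolves_from then h else h.insert evolves_from []).modify evolves_from [] (· ++ [pokemon_name])
      else h) PySem.Dict.empty
      = M.foldl pvStepM PySem.Dict.empty := by
    rw [hpairs] at hM
    rw [show ∀ dd, cards.foldl (fun h card =>
      let pokemon_name := pvName card
      let evolves_from := (PySem.Dict.mk card).getD "evolves_from" "N/A"
      if evolves_from ≠ "N/A" then
        (if h.contains evolves_from then h else h.insert evolves_from []).modify evolves_from [] (· ++ [pokemon_name])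
      else h) dd = pairs.foldl pvStepA dd from fun dd => by
        rw [hpairs, List.foldl_map]; rfl]
    rw [foldl_stepA_eq, ← hM]
  rw [hA, parents_eq, ← hM]
  -- keys of the fold are the distinct parents, and each value is the filtered names
  have hkeys : (M.foldl pvStepM PySem.Dict.empty).keys
      = M.foldl (fun ps pq => PySem.Set.add ps pq.1) [] := by
    rw [show M.foldl pvStepM PySem.Dict.empty
        = M.foldl (fun d x => d.modify x.1 [] ((fun _ pq v => v ++ [pq.2]) d x)) PySem.Dict.empty from rfl]
    rw [PySem.Dict.keys_foldl_modify_key M Prod.fst [] (fun _ pq v => v ++ [pq.2]) PySem.Dict.empty,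
      PySem.Dict.keys_empty, PySem.Set.update_map_eq_foldl_add M Prod.fst []]
  have hnodup : (M.foldl pvStepM PySem.Dict.empty).keys.Nodup := by
    rw [show M.foldl pvStepM PySem.Dict.empty
        = M.foldl (fun d x => d.modify x.1 [] ((fun _ pq v => v ++ [pq.2]) d x)) PySem.Dict.empty from rfl]
    exact PySem.Dict.nodup_keys_foldl_modify_key M Prod.fst [] _ _ PySem.Dict.nodup_keys_empty
  rw [PySem.Dict.items_eq_map_keys _ hnodup [], hkeys]
  apply List.map_congr_left
  intro p hp
  -- p is a non-"N/A" parent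
  have hpM : p ∈ M.map Prod.fst := by
    rw [← PySem.Set.update_map_eq_foldl_add M Prod.fst []] at hp
    simpa [PySem.Set.mem_update] using hp
  have hpNA : p ≠ "N/A" := by
    obtain ⟨q, hq, hq1⟩ := List.mem_map.mp hpM
    have h2 := List.of_mem_filter hq
    simp only [Bool.not_eq_true', beq_eq_false_iff_ne, ne_eq] at h2
    exact hq1 ▸ h2
  congr 1
  rw [show M.foldl pvStepM PySem.Dict.empty
      = M.foldl (fun d pq => d.modify pq.1 [] (fun v => v ++ [pq.2])) PySem.Dict.empty from rfl,
    PySem.Dict.getD_foldl_modify_append M PySem.Dict.empty p, PySem.Dict.getD_empty, List.nil_append,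
    hM, List.filter_filter]
  congr 1
  apply List.filter_congr
  intro q _
  by_cases hqp : q.1 = p
  · simp [hqp, hpNA]
  · simp [hqp]
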